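-- pv_equiv track=rewrite | github.com/xjv587/Friends | myfriends.py | generate_friends
-- ===== SOURCE A (Python) =====
-- def generate_friends(friends_dir):
--   persons = sorted(friends_dir.keys())
--   returned_pairs = set()
--
--   while persons:
--     person = persons.pop(0)
--     friends = sorted([s for s in friends_dir[person] if s > person])
--
--     while friends:
--       pair = (person, friends.pop())
--       if pair not in returned_pairs:
--         returned_pairs.add(pair)
--         yield pair
-- ===== SOURCE B (Python) =====
-- def generate_friends(friends_dir):
--   # gather all unique (person, friend) pairs with friend > person, then one
--   # global two-stage stable sort: friend descending, then person ascending
--   seen = set()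
--   pairs = []
--   for person, friends in friends_dir.items():
--     for f in friends:
--       if f > person and (person, f) not in seen:
--         seen.add((person, f))
--         pairs.append((person, f))
--   pairs.sort(key=lambda pr: pr[1], reverse=True)
--   pairs.sort(key=lambda pr: pr[0])
--   yield from pairs
-- ===== Notes on version B (the rewrite author's own statement) =====
-- stated objective: alternative
-- what changed: A's nested while-loops (pop sorted keys from the front, per person sort the qualifying friends and pop them from the back, dedup incrementally against a running set) are replaced by a single gather pass over the dict items building the unique qualifying pairs, followed by one global two-stage stable sort (friend descending, then person ascending) and a single yield loop.
import Mathlib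
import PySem

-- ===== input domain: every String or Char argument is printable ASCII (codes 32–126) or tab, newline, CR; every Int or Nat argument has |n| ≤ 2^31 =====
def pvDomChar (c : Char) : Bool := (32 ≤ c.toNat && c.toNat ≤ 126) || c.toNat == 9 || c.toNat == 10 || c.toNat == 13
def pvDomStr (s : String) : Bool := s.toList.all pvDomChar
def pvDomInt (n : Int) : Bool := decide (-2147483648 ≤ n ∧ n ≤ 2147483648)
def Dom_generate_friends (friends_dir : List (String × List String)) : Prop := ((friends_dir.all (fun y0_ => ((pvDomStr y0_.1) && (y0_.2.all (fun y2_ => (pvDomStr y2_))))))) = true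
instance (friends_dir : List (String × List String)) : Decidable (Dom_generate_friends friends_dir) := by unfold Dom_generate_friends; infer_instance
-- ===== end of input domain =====

-- B replaces A's nested pop-loops with incremental per-person dedup by a single gather pass
-- over the dict items followed by a global two-stage stable sort (objective: alternative).
-- Equivalence is about the RETURN value (the list of yielded pairs, as 2-element lists).

-- ===== PORT A =====
def generate_friends (friends_dir : List (String × List String)) : List (List String) :=
  let d := PySem.Dict.mk friends_dir
  let persons := PySem.List.sorted d.keys (fun x => x)
  -- 'while persons: person = persons.pop(0)' consumes the sorted keys left to right;
  -- 'while friends: friends.pop()' consumes the sorted friends right to left (= foldl over the reverse)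
  let st := persons.foldl
    (fun (st : List (List String) × PySem.Set (String × String)) person =>
      let friends := PySem.List.sorted ((d.getD person []).filter (fun s => decide (s > person))) (fun x => x)
      friends.reverse.foldl
        (fun st f =>
          if !(PySem.Set.contains st.2 (person, f)) then
            (st.1 ++ [[person, f]], PySem.Set.add st.2 (person, f))
          else st) st)
    ([], PySem.Set.empty)
  st.1

-- ===== PORT B =====
def generate_friends_alt (friends_dir : List (String × List String)) : List (List String) :=
  let d := PySem.Dict.mk friends_dir
  -- gather pass: unique (person, friend) pairs with friend > person, in items order
  let st := d.items.foldl
    (fun (st : PySem.Set (String × String) × List (String × String)) pf =>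
      pf.2.foldl
        (fun st f =>
          if decide (f > pf.1) && !(PySem.Set.contains st.1 (pf.1, f)) then
            (PySem.Set.add st.1 (pf.1, f), st.2 ++ [(pf.1, f)])
          else st) st)
    (PySem.Set.empty, [])
  -- two-stage stable sort: friend descending, then person ascending
  let s1 := PySem.List.sorted st.2 (fun pr => pr.2) true
  let s2 := PySem.List.sorted s1 (fun pr => pr.1)
  s2.map (fun pr => [pr.1, pr.2])

-- ===== PRECONDITION & SPEC =====
-- Pre_ requires pairwise-distinct keys: a Python dict always has distinct keys, so this
-- excludes only association lists that correspond to no dict input at all.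
def Pre_generate_friends (friends_dir : List (String × List String)) : Prop :=
  (friends_dir.map Prod.fst).Nodup
instance (friends_dir : List (String × List String)) : Decidable (Pre_generate_friends friends_dir) := by unfold Pre_generate_friends; infer_instance

def pvWitness_generate_friends : (List (String × List String)) :=
  [("bob", ["alice", "carol", "dan"]), ("alice", ["bob", "carol"])]

def Spec_generate_friends (friends_dir : List (String × List String)) (out : List (List String)) : Prop := out = generate_friends_alt friends_dir
instance (friends_dir : List (String × List String)) (out : List (List String)) : Decidable (Spec_generate_friends friends_dir out) := by unfold Spec_generate_friends; infer_instance

-- ===== CLAIM (what is proved, stated in full; the proofs are below) =====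
def Claim_equal_generate_friends : Prop := ∀ (friends_dir : List (String × List String)), Dom_generate_friends friends_dir → Pre_generate_friends friends_dir → Spec_generate_friends friends_dir (generate_friends friends_dir)

-- ===== LEMMAS AND PROOFS =====

-- the strict order in which both programs emit pairs: person ascending, friend descending
def pairR (a b : String × String) : Prop := a.1 < b.1 ∨ (a.1 = b.1 ∧ b.2 < a.2)

-- x.2 is one of x.1's listed friends and is greater than x.1
def pairOk (fd : List (String × List String)) (x : String × String) : Prop :=
  x.1 < x.2 ∧ x.2 ∈ (PySem.Dict.mk fd).getD x.1 []

-- the pairs A's inner while-loop adds for person p, given already-returned pairs `seen`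
def collectNew (p : String) (seen : List (String × String)) : List String → List (String × String)
  | [] => []
  | f :: t => if (p, f) ∈ seen then collectNew p seen t
              else (p, f) :: collectNew p (seen ++ [(p, f)]) t

theorem innerA_eq (p : String) (rs : List String) (out : List (List String))
    (ret : List (String × String)) :
    rs.foldl
      (fun st f =>
        if !(PySem.Set.contains st.2 (p, f)) then
          (st.1 ++ [[p, f]], PySem.Set.add st.2 (p, f))
        else st) (out, ret)
    = (out ++ (collectNew p ret rs).map (fun q => [q.1, q.2]), ret ++ collectNew p ret rs) := by
  induction rs generalizing out ret with
  | nil => simp [collectNew]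
  | cons f t ih =>
    rw [List.foldl_cons]
    by_cases h : (p, f) ∈ ret
    · show List.foldl _ (if (!PySem.Set.contains ret (p, f)) = true then
          (out ++ [[p, f]], PySem.Set.add ret (p, f)) else (out, ret)) t = _
      rw [if_neg (by simp [PySem.Set.contains, h]), ih, collectNew, if_pos h]
    · show List.foldl _ (if (!PySem.Set.contains ret (p, f)) = true then
          (out ++ [[p, f]], PySem.Set.add ret (p, f)) else (out, ret)) t = _
      rw [if_pos (by simp [PySem.Set.contains, h]),
        show PySem.Set.add ret (p, f) = ret ++ [(p, f)] from by
          simp [PySem.Set.add, PySem.Set.contains, h],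
        ih, collectNew, if_neg h]
      simp [List.append_assoc]

theorem mem_collectNew (p : String) (rs : List String) (seen : List (String × String))
    (x : String × String) :
    x ∈ collectNew p seen rs ↔ x ∉ seen ∧ x.1 = p ∧ x.2 ∈ rs := by
  obtain ⟨x1, x2⟩ := x
  induction rs generalizing seen with
  | nil => simp [collectNew]
  | cons f t ih =>
    by_cases h : (p, f) ∈ seen
    · rw [collectNew, if_pos h, ih]
      constructor
      · rintro ⟨h1, h2, h3⟩; exact ⟨h1, h2, List.mem_cons_of_mem _ h3⟩
      · rintro ⟨h1, rfl, h3⟩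
        rcases List.mem_cons.mp h3 with rfl | h3
        · exact absurd h h1
        · exact ⟨h1, rfl, h3⟩
    · rw [collectNew, if_neg h]
      constructor
      · intro hm
        rcases List.mem_cons.mp hm with hm | hm
        · rw [Prod.mk.injEq] at hm
          obtain ⟨rfl, rfl⟩ := hm
          exact ⟨h, rfl, List.mem_cons_self⟩
        · obtain ⟨h1, h2, h3⟩ := (ih _).mp hm
          exact ⟨fun hx => h1 (List.mem_append_left _ hx), h2, List.mem_cons_of_mem _ h3⟩
      · rintro ⟨h1, rfl, h3⟩
        by_cases hx : x2 = f
        · subst hx; exact List.mem_cons_self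
        · refine List.mem_cons_of_mem _ ((ih _).mpr ⟨?_, rfl, ?_⟩)
          · intro hmem
            rcases List.mem_append.mp hmem with hmem | hmem
            · exact h1 hmem
            · rw [List.mem_singleton, Prod.mk.injEq] at hmem
              exact hx hmem.2
          · rcases List.mem_cons.mp h3 with rfl | h3
            · exact absurd rfl hx
            · exact h3

theorem collectNew_pairwise (p : String) (rs : List String) (seen : List (String × String))
    (hrs : rs.Pairwise (fun a b => b ≤ a)) :
    (collectNew p seen rs).Pairwise (fun a b => b.2 < a.2) := by
  induction rs generalizing seen with
  | nil => exact List.Pairwise.nil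
  | cons f t ih =>
    rw [List.pairwise_cons] at hrs
    obtain ⟨hhead, htail⟩ := hrs
    by_cases h : (p, f) ∈ seen
    · rw [collectNew, if_pos h]; exact ih _ htail
    · rw [collectNew, if_neg h]
      refine List.Pairwise.cons ?_ (ih _ htail)
      intro y hy
      obtain ⟨hy1, hy2, hy3⟩ := (mem_collectNew p t _ y).mp hy
      have hle : y.2 ≤ f := hhead _ hy3
      have hne : y.2 ≠ f := by
        intro he
        apply hy1
        apply List.mem_append_right
        have : y = (p, f) := Prod.ext_iff.mpr ⟨hy2, he⟩
        simp [this]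
      exact lt_of_le_of_ne hle hne

theorem pairR_ne {a b : String × String} (h : pairR a b) : a ≠ b := by
  rintro rfl
  rcases h with h | ⟨_, h⟩
  · exact lt_irrefl _ h
  · exact lt_irrefl _ h

theorem pairR_fst_le {a b : String × String} (h : pairR a b) : a.1 ≤ b.1 := by
  rcases h with h | ⟨h, _⟩
  · exact le_of_lt h
  · exact le_of_eq h

theorem pairR_antisymm {a b : String × String} (h1 : pairR a b) (h2 : pairR b a) : False := by
  rcases h1 with h1 | ⟨h1, h1'⟩ <;> rcases h2 with h2 | ⟨h2, h2'⟩
  · exact lt_irrefl _ (lt_trans h1 h2)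
  · exact absurd (h2 ▸ h1) (lt_irrefl _)
  · exact absurd (h1 ▸ h2) (lt_irrefl _)
  · exact lt_irrefl _ (lt_trans h1' h2')

theorem outerA (fd : List (String × List String)) (persons : List String)
    (out : List (List String)) (ret : List (String × String))
    (hps : persons.Pairwise (· < ·))
    (hout : out = ret.map (fun q => [q.1, q.2]))
    (hcross : ∀ q ∈ ret, ∀ p ∈ persons, q.1 < p)
    (hR : ret.Pairwise pairR) :
    (persons.foldl
      (fun (st : List (List String) × PySem.Set (String × String)) person =>
        (PySem.List.sorted (((PySem.Dict.mk fd).getD person []).filter (fun s => decide (s > person))) (fun x => x)).reverse.foldl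
          (fun st f =>
            if !(PySem.Set.contains st.2 (person, f)) then
              (st.1 ++ [[person, f]], PySem.Set.add st.2 (person, f))
            else st) st)
      (out, ret)).1 = (persons.foldl
      (fun (st : List (List String) × PySem.Set (String × String)) person =>
        (PySem.List.sorted (((PySem.Dict.mk fd).getD person []).filter (fun s => decide (s > person))) (fun x => x)).reverse.foldl
          (fun st f =>
            if !(PySem.Set.contains st.2 (person, f)) then
              (st.1 ++ [[person, f]], PySem.Set.add st.2 (person, f))
            else st) st)
      (out, ret)).2.map (fun q => [q.1, q.2]) ∧
    (persons.foldl
      (fun (st : List (List String) × PySem.Set (String × String)) person =>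
        (PySem.List.sorted (((PySem.Dict.mk fd).getD person []).filter (fun s => decide (s > person))) (fun x => x)).reverse.foldl
          (fun st f =>
            if !(PySem.Set.contains st.2 (person, f)) then
              (st.1 ++ [[person, f]], PySem.Set.add st.2 (person, f))
            else st) st)
      (out, ret)).2.Pairwise pairR ∧
      ∀ x, (x ∈ (persons.foldl
      (fun (st : List (List String) × PySem.Set (String × String)) person =>
        (PySem.List.sorted (((PySem.Dict.mk fd).getD person []).filter (fun s => decide (s > person))) (fun x => x)).reverse.foldl
          (fun st f =>
            if !(PySem.Set.contains st.2 (person, f)) then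
              (st.1 ++ [[person, f]], PySem.Set.add st.2 (person, f))
            else st) st)
      (out, ret)).2 ↔ x ∈ ret ∨ (x.1 ∈ persons ∧ pairOk fd x)) := by
  induction persons generalizing out ret with
  | nil => refine ⟨hout, hR, ?_⟩; simp
  | cons p ps ih =>
    rw [List.pairwise_cons] at hps
    obtain ⟨hphead, hptail⟩ := hps
    simp only [List.foldl_cons]
    rw [innerA_eq]
    have hrsdec : ((PySem.List.sorted (((PySem.Dict.mk fd).getD p []).filter (fun s => decide (s > p))) (fun x => x)).reverse).Pairwise (fun a b => b ≤ a) := by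
      rw [List.pairwise_reverse]
      exact PySem.List.sorted_pairwise _ _
    have hmemD : ∀ y : String × String,
        y ∈ collectNew p ret ((PySem.List.sorted (((PySem.Dict.mk fd).getD p []).filter (fun s => decide (s > p))) (fun x => x)).reverse) ↔
          y ∉ ret ∧ y.1 = p ∧ (y.2 ∈ (PySem.Dict.mk fd).getD y.1 [] ∧ y.1 < y.2) := by
      intro y
      rw [mem_collectNew]
      constructor
      · rintro ⟨h1, rfl, h3⟩
        rw [List.mem_reverse, PySem.List.mem_sorted, List.mem_filter] at h3
        refine ⟨h1, rfl, h3.1, by simpa using h3.2⟩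
      · rintro ⟨h1, rfl, h3, h4⟩
        refine ⟨h1, rfl, ?_⟩
        rw [List.mem_reverse, PySem.List.mem_sorted, List.mem_filter]
        exact ⟨h3, by simpa using h4⟩
    have hDfst : ∀ y ∈ collectNew p ret ((PySem.List.sorted (((PySem.Dict.mk fd).getD p []).filter (fun s => decide (s > p))) (fun x => x)).reverse), y.1 = p :=
      fun y hy => ((hmemD y).mp hy).2.1
    have hDR : (collectNew p ret ((PySem.List.sorted (((PySem.Dict.mk fd).getD p []).filter (fun s => decide (s > p))) (fun x => x)).reverse)).Pairwise pairR := by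
      have hbase := collectNew_pairwise p _ ret hrsdec
      refine List.Pairwise.imp_of_mem ?_ hbase
      intro a b ha hb hab
      exact Or.inr ⟨(hDfst a ha).trans (hDfst b hb).symm, hab⟩
    have hR' : (ret ++ collectNew p ret ((PySem.List.sorted (((PySem.Dict.mk fd).getD p []).filter (fun s => decide (s > p))) (fun x => x)).reverse)).Pairwise pairR := by
      rw [List.pairwise_append]
      refine ⟨hR, hDR, ?_⟩
      intro a ha b hb
      exact Or.inl ((hDfst b hb) ▸ hcross a ha p List.mem_cons_self)
    have hcross' : ∀ q ∈ ret ++ collectNew p ret ((PySem.List.sorted (((PySem.Dict.mk fd).getD p []).filter (fun s => decide (s > p))) (fun x => x)).reverse), ∀ p' ∈ ps, q.1 < p' := by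
      intro q hq p' hp'
      rcases List.mem_append.mp hq with hq | hq
      · exact hcross q hq p' (List.mem_cons_of_mem _ hp')
      · rw [hDfst q hq]; exact hphead p' hp'
    obtain ⟨g1, g2, g3⟩ := ih (out ++ (collectNew p ret ((PySem.List.sorted (((PySem.Dict.mk fd).getD p []).filter (fun s => decide (s > p))) (fun x => x)).reverse)).map (fun q => [q.1, q.2]))
      (ret ++ collectNew p ret ((PySem.List.sorted (((PySem.Dict.mk fd).getD p []).filter (fun s => decide (s > p))) (fun x => x)).reverse)) hptail (by rw [hout, List.map_append]) hcross' hR'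
    refine ⟨g1, g2, ?_⟩
    intro x
    rw [g3 x, List.mem_append, hmemD x]
    unfold pairOk
    by_cases hxr : x ∈ ret
    · simp [hxr]
    · constructor
      · rintro ((hx | ⟨_, rfl, h3, h4⟩) | ⟨hx, hq⟩)
        · exact Or.inl hx
        · exact Or.inr ⟨List.mem_cons_self, h4, h3⟩
        · exact Or.inr ⟨List.mem_cons_of_mem _ hx, hq⟩
      · rintro (hx | ⟨hmem, hq1, hq2⟩)
        · exact Or.inl (Or.inl hx)
        · rcases List.mem_cons.mp hmem with hx1 | hx1
          · exact Or.inl (Or.inr ⟨hxr, hx1, hq2, hq1⟩)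
          · exact Or.inr ⟨hx1, hq1, hq2⟩

theorem innerB (p : String) (fs : List String)
    (st : PySem.Set (String × String) × List (String × String))
    (h : st.2 = st.1) (hn : st.1.Nodup) :
    (fs.foldl
      (fun st f =>
        if decide (f > p) && !(PySem.Set.contains st.1 (p, f)) then
          (PySem.Set.add st.1 (p, f), st.2 ++ [(p, f)])
        else st) st).2 = (fs.foldl
      (fun st f =>
        if decide (f > p) && !(PySem.Set.contains st.1 (p, f)) then
          (PySem.Set.add st.1 (p, f), st.2 ++ [(p, f)])
        else st) st).1 ∧ (fs.foldl
      (fun st f =>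
        if decide (f > p) && !(PySem.Set.contains st.1 (p, f)) then
          (PySem.Set.add st.1 (p, f), st.2 ++ [(p, f)])
        else st) st).1.Nodup ∧
    ∀ x, (x ∈ (fs.foldl
      (fun st f =>
        if decide (f > p) && !(PySem.Set.contains st.1 (p, f)) then
          (PySem.Set.add st.1 (p, f), st.2 ++ [(p, f)])
        else st) st).1 ↔ x ∈ st.1 ∨ (x.1 = p ∧ x.2 ∈ fs ∧ x.1 < x.2)) := by
  induction fs generalizing st with
  | nil =>
    refine ⟨h, hn, ?_⟩
    intro x
    simp
  | cons f t ih =>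
    rw [List.foldl_cons]
    by_cases hcond : (p < f) ∧ (p, f) ∉ st.1
    · have hcb : (decide (f > p) && !(PySem.Set.contains st.1 (p, f))) = true := by
        simp [PySem.Set.contains, hcond.1, hcond.2]
      have hnodup : (st.1 ++ [(p, f)]).Nodup := by
        simp [List.nodup_append, hn]
        intro a b hab hap hbf
        exact hcond.2 (by rw [← hap, ← hbf]; exact hab)
      rw [if_pos hcb,
        show PySem.Set.add st.1 (p, f) = st.1 ++ [(p, f)] from by
          simp [PySem.Set.add, PySem.Set.contains, hcond.2]]
      obtain ⟨g1, g2, g3⟩ := ih (st := (st.1 ++ [(p, f)], st.2 ++ [(p, f)])) (by simp [h]) hnodup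
      refine ⟨g1, g2, ?_⟩
      intro x
      rw [g3 x]
      dsimp only
      constructor
      · rintro (hx | ⟨h1, h2, h3⟩)
        · rcases List.mem_append.mp hx with hx | hx
          · exact Or.inl hx
          · rw [List.mem_singleton] at hx
            subst hx
            exact Or.inr ⟨rfl, List.mem_cons_self, hcond.1⟩
        · exact Or.inr ⟨h1, List.mem_cons_of_mem _ h2, h3⟩
      · rintro (hx | ⟨h1, h2, h3⟩)
        · exact Or.inl (List.mem_append_left _ hx)
        · rcases List.mem_cons.mp h2 with h2 | h2
          · have hxe : x = (p, f) := Prod.ext_iff.mpr ⟨h1, h2⟩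
            exact Or.inl (List.mem_append_right _ (by simp [hxe]))
          · exact Or.inr ⟨h1, h2, h3⟩
    · have hcb : (decide (f > p) && !(PySem.Set.contains st.1 (p, f))) = false := by
        rcases not_and_or.mp hcond with hc | hc
        · have hc' : ¬ p.toList < f.toList := fun hlt => hc (String.lt_iff_toList_lt.mpr hlt)
          simp [GT.gt, hc']
        · simp [PySem.Set.contains, not_not.mp hc]
      rw [if_neg (by rw [hcb]; exact Bool.false_ne_true)]
      obtain ⟨g1, g2, g3⟩ := ih st h hn
      refine ⟨g1, g2, ?_⟩
      intro x
      rw [g3 x]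
      constructor
      · rintro (hx | ⟨h1, h2, h3⟩)
        · exact Or.inl hx
        · exact Or.inr ⟨h1, List.mem_cons_of_mem _ h2, h3⟩
      · rintro (hx | ⟨h1, h2, h3⟩)
        · exact Or.inl hx
        · rcases List.mem_cons.mp h2 with h2 | h2
          · have hxe : x = (p, f) := Prod.ext_iff.mpr ⟨h1, h2⟩
            rcases not_and_or.mp hcond with hc | hc
            · have : p < f := by rw [hxe] at h3; exact h3
              exact absurd this hc
            · exact Or.inl (by rw [hxe]; exact not_not.mp hc)
          · exact Or.inr ⟨h1, h2, h3⟩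

theorem outerB (items : List (String × List String))
    (st : PySem.Set (String × String) × List (String × String))
    (h : st.2 = st.1) (hn : st.1.Nodup) :
    (items.foldl
      (fun (st : PySem.Set (String × String) × List (String × String)) pf =>
        pf.2.foldl
          (fun st f =>
            if decide (f > pf.1) && !(PySem.Set.contains st.1 (pf.1, f)) then
              (PySem.Set.add st.1 (pf.1, f), st.2 ++ [(pf.1, f)])
            else st) st) st).2 = (items.foldl
      (fun (st : PySem.Set (String × String) × List (String × String)) pf =>
        pf.2.foldl
          (fun st f =>
            if decide (f > pf.1) && !(PySem.Set.contains st.1 (pf.1, f)) then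
              (PySem.Set.add st.1 (pf.1, f), st.2 ++ [(pf.1, f)])
            else st) st) st).1 ∧ (items.foldl
      (fun (st : PySem.Set (String × String) × List (String × String)) pf =>
        pf.2.foldl
          (fun st f =>
            if decide (f > pf.1) && !(PySem.Set.contains st.1 (pf.1, f)) then
              (PySem.Set.add st.1 (pf.1, f), st.2 ++ [(pf.1, f)])
            else st) st) st).1.Nodup ∧
      ∀ x, (x ∈ (items.foldl
      (fun (st : PySem.Set (String × String) × List (String × String)) pf =>
        pf.2.foldl
          (fun st f =>
            if decide (f > pf.1) && !(PySem.Set.contains st.1 (pf.1, f)) then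
              (PySem.Set.add st.1 (pf.1, f), st.2 ++ [(pf.1, f)])
            else st) st) st).1 ↔ x ∈ st.1 ∨ ∃ pf ∈ items, x.1 = pf.1 ∧ x.2 ∈ pf.2 ∧ x.1 < x.2) := by
  induction items generalizing st with
  | nil =>
    refine ⟨h, hn, ?_⟩
    intro x
    simp
  | cons pf rest ih =>
    simp only [List.foldl_cons]
    obtain ⟨i1, i2, i3⟩ := innerB pf.1 pf.2 st h hn
    obtain ⟨g1, g2, g3⟩ := ih _ i1 i2
    refine ⟨g1, g2, ?_⟩
    intro x
    rw [g3 x, i3 x]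
    constructor
    · rintro ((hx | ⟨h1, h2, h3⟩) | ⟨q, hq, h1, h2, h3⟩)
      · exact Or.inl hx
      · exact Or.inr ⟨pf, List.mem_cons_self, h1, h2, h3⟩
      · exact Or.inr ⟨q, List.mem_cons_of_mem _ hq, h1, h2, h3⟩
    · rintro (hx | ⟨q, hq, h1, h2, h3⟩)
      · exact Or.inl (Or.inl hx)
      · rcases List.mem_cons.mp hq with rfl | hq
        · exact Or.inl (Or.inr ⟨h1, h2, h3⟩)
        · exact Or.inr ⟨q, hq, h1, h2, h3⟩

theorem insertBy_pairwiseR (x : String × String) (acc : List (String × String))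
    (hacc : acc.Pairwise pairR) (hx : ∀ y ∈ acc, y.1 = x.1 → x.2 < y.2) :
    (PySem.List.insertBy (fun a b => decide (a.1 < b.1)) x acc).Pairwise pairR := by
  induction acc with
  | nil => simp [PySem.List.insertBy]
  | cons y ys ih =>
    rw [List.pairwise_cons] at hacc
    obtain ⟨hhead, htail⟩ := hacc
    rw [PySem.List.insertBy]
    by_cases hlt : x.1 < y.1
    · rw [if_pos (by simpa using hlt)]
      refine List.Pairwise.cons ?_ (List.pairwise_cons.mpr ⟨hhead, htail⟩)
      intro z hz
      rcases List.mem_cons.mp hz with rfl | hz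
      · exact Or.inl hlt
      · exact Or.inl (lt_of_lt_of_le hlt (pairR_fst_le (hhead z hz)))
    · rw [if_neg (by simpa using hlt)]
      refine List.Pairwise.cons ?_ (ih htail (fun z hz => hx z (List.mem_cons_of_mem _ hz)))
      intro z hz
      rcases (PySem.List.mem_insertBy _ _ _ _).mp hz with rfl | hz
      · by_cases heq : y.1 = z.1
        · exact Or.inr ⟨heq, hx y List.mem_cons_self heq⟩
        · exact Or.inl (lt_of_le_of_ne (le_of_not_gt hlt) heq)
      · exact hhead z hz

theorem foldl_insertBy_pairwiseR (l acc : List (String × String))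
    (hacc : acc.Pairwise pairR)
    (hl : l.Pairwise (fun a b => a.1 = b.1 → b.2 < a.2))
    (hcross : ∀ x ∈ l, ∀ y ∈ acc, y.1 = x.1 → x.2 < y.2) :
    (l.foldl (fun acc x => PySem.List.insertBy (fun a b => decide (a.1 < b.1)) x acc) acc).Pairwise pairR := by
  induction l generalizing acc with
  | nil => exact hacc
  | cons x t ih =>
    rw [List.pairwise_cons] at hl
    obtain ⟨hhead, htail⟩ := hl
    rw [List.foldl_cons]
    refine ih _ (insertBy_pairwiseR x acc hacc (hcross x List.mem_cons_self)) htail ?_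
    intro z hz y hy heq
    rcases (PySem.List.mem_insertBy _ _ _ _).mp hy with rfl | hy
    · exact hhead z hz heq
    · exact hcross z (List.mem_cons_of_mem _ hz) y hy heq

theorem sorted_fst_pairwiseR (l : List (String × String))
    (hl : l.Pairwise (fun a b => a.1 = b.1 → b.2 < a.2)) :
    (PySem.List.sorted l (fun pr => pr.1)).Pairwise pairR := by
  rw [PySem.List.sorted_eq_foldl_insertBy]
  exact foldl_insertBy_pairwiseR l [] List.Pairwise.nil hl (by simp)

theorem mem_bridge (fd : List (String × List String)) (hpre : (fd.map Prod.fst).Nodup)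
    (x : String × String) :
    (x.1 ∈ (PySem.Dict.mk fd).keys ∧ pairOk fd x) ↔
      (∃ pf ∈ (PySem.Dict.mk fd).items, x.1 = pf.1 ∧ x.2 ∈ pf.2 ∧ x.1 < x.2) := by
  have hnd : ((PySem.Dict.mk fd).keys).Nodup := hpre
  unfold pairOk
  constructor
  · rintro ⟨hk, hlt, hmem⟩
    have hk' : x.1 ∈ fd.map Prod.fst := hk
    obtain ⟨pf, hpf, heq⟩ := List.mem_map.mp hk'
    have hg : (PySem.Dict.mk fd).getD x.1 [] = pf.2 :=
      PySem.Dict.getD_of_mem_items _ (by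
        show (x.1, pf.2) ∈ (PySem.Dict.mk fd).items
        rw [← heq]
        simpa using hpf) hnd []
    exact ⟨pf, hpf, heq.symm, by rw [← hg]; exact hmem, hlt⟩
  · rintro ⟨pf, hpf, h1, h2, h3⟩
    have hg : (PySem.Dict.mk fd).getD pf.1 [] = pf.2 :=
      PySem.Dict.getD_of_mem_items _ (by simpa using hpf) hnd []
    exact ⟨List.mem_map.mpr ⟨pf, hpf, h1.symm⟩, h3, by rw [h1, hg]; exact h2⟩

-- ===== VERDICT (by name: the statement is the Claim_ definition above) =====
theorem generate_friends_spec : Claim_equal_generate_friends := by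
  intro fd hdom hpre
  unfold Spec_generate_friends generate_friends generate_friends_alt
  dsimp only
  have hnd : ((PySem.Dict.mk fd).keys).Nodup := hpre
  have hpnd : (PySem.List.sorted (PySem.Dict.mk fd).keys (fun x => x)).Nodup :=
    ((PySem.List.sorted_perm _ _ _).nodup_iff).mpr hnd
  have hps : (PySem.List.sorted (PySem.Dict.mk fd).keys (fun x => x)).Pairwise (· < ·) :=
    (List.Pairwise.and (PySem.List.sorted_pairwise (PySem.Dict.mk fd).keys (fun x => x)) hpnd).imp
      (fun h => lt_of_le_of_ne h.1 h.2)
  obtain ⟨hA1, hA2, hA3⟩ := outerA fd (PySem.List.sorted (PySem.Dict.mk fd).keys (fun x => x))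
    [] PySem.Set.empty hps rfl (fun q hq => absurd hq (List.not_mem_nil)) List.Pairwise.nil
  obtain ⟨hB0, hBnd, hBmem⟩ := outerB (PySem.Dict.mk fd).items (PySem.Set.empty, []) rfl
    List.nodup_nil
  rw [hA1, hB0]
  apply congrArg (List.map (fun q : String × String => [q.1, q.2]))
  refine List.eq_of_perm_of_sorted (fun a b _ _ h1 h2 => (pairR_antisymm h1 h2).elim) hA2
    (sorted_fst_pairwiseR _ (((PySem.List.sorted_pairwise_rev _ _).and
        (((PySem.List.sorted_perm _ _ _).nodup_iff).mpr hBnd)).imp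
      (fun h heq => lt_of_le_of_ne h.1 (fun h2 => h.2 (Prod.ext_iff.mpr ⟨heq, h2.symm⟩)))))
    ?_
  rw [List.perm_ext_iff_of_nodup (hA2.imp (fun h => pairR_ne h))
    (((PySem.List.sorted_perm _ _ _).nodup_iff).mpr
      (((PySem.List.sorted_perm _ _ _).nodup_iff).mpr hBnd))]
  intro x
  rw [hA3 x]
  simp only [PySem.List.mem_sorted]
  rw [hBmem x]
  simp only [PySem.Set.empty, List.not_mem_nil, false_or]
  exact mem_bridge fd hpre x
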